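-- pv_equiv track=rewrite | github.com/Rahul12344/IllumioCodingChallenge | illumio.py | create_ip_range
-- ===== SOURCE A (Python) =====
-- def create_ip_range(ip_range):
--     if '-' in ip_range:
--         arr_1 = [None]*256
--         arr_2 = [None]*256
--         arr_3 = [None]*256
--         arr_4 = [None]*256
--         ip_arr = [arr_1, arr_2, arr_3, arr_4]
--         ip_vals = ip_range.split('-')
--         ip_vals[0] = ip_vals[0].split('.')
--         ip_vals[1] = ip_vals[1].split('.')
--         for i in range(len(ip_vals[0])):
--             for j in range(int(ip_vals[0][i]), int(ip_vals[1][i]) + 1):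
--                 ip_arr[i][j] = 1
--         return ip_arr
--     else:
--         arr_1 = [None]*256
--         arr_2 = [None]*256
--         arr_3 = [None]*256
--         arr_4 = [None]*256
--         ip_arr = [arr_1, arr_2, arr_3, arr_4]
--         ip = ip_range.split('.')
--         pos = 0
--         for partition in ip:
--             ip_arr[pos][int(partition)] = 1
--             pos = pos + 1
--         return ip_arr
-- ===== SOURCE B (Python) =====
-- def create_ip_range(ip_range):
--     # One unified pass: parse start/end octet lists, then build each row by a
--     # comprehension testing membership in the row's interval (no mutation).
--     if '-' in ip_range:
--         parts = ip_range.split('-')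
--         start = parts[0].split('.')
--         end = parts[1].split('.')
--     else:
--         start = ip_range.split('.')
--         end = start
--     bounds = [(int(start[i]), int(end[i])) for i in range(len(start))]
--     return [[1 if i < len(bounds) and bounds[i][0] <= j and j <= bounds[i][1] else None
--              for j in range(256)]
--             for i in range(4)]
-- ===== Notes on version B (the rewrite author's own statement) =====
-- stated objective: simpler
-- what changed: B unifies A's two branches into one parse step (start/end octet lists, equal for a single IP) and replaces A's mutating mark loops over preallocated arrays by building each of the four rows directly with an interval-membership comprehension.
import Mathlib
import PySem

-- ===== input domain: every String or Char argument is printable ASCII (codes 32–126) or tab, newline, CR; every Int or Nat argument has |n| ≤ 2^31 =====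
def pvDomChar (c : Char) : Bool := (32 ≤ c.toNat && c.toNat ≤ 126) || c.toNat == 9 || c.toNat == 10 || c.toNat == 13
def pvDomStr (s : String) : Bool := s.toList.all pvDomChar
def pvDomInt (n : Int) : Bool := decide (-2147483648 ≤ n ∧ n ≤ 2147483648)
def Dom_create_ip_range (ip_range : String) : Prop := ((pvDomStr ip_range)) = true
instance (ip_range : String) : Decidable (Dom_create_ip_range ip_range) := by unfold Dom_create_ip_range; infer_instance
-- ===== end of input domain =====

-- B unifies A's two branches into one parse step and replaces the mutating mark
-- loops by building each of the four rows directly with an interval-membership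
-- comprehension (objective: simpler).

-- shared thin wrappers over PySem primitives (exact on Pre_'s domain):
-- s.split(sep) with sep ≠ "" (split? is `some` then, exact)
def pvSplit (s sep : String) : List String := (PySem.Str.split? s sep).getD []
-- int(s); Pre_ guarantees ofStr? = some (ValueError excluded)
def pvInt (s : String) : Int := (PySem.Int.ofStr? s).getD 0

-- ===== PORT A =====
-- ip_arr[i][j] = 1; exact for 0 ≤ i < 4 and 0 ≤ j < 256, which Pre_ guarantees
-- (out-of-range IndexError is excluded by Pre_; negative values cannot parse here)
def pvMark (arr : List (List (Option Int))) (i j : Int) : List (List (Option Int)) :=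
  arr.set i.toNat ((arr.getD i.toNat []).set j.toNat (some 1))

def create_ip_range (ip_range : String) : List (List (Option Int)) :=
  if PySem.Str.isIn "-" ip_range then
    let ip_arr : List (List (Option Int)) :=
      [List.replicate 256 none, List.replicate 256 none,
       List.replicate 256 none, List.replicate 256 none]
    let ip_vals := pvSplit ip_range "-"
    let v0 := pvSplit (ip_vals.getD 0 "") "."
    let v1 := pvSplit (ip_vals.getD 1 "") "."
    (PySem.List.pyRange 0 (v0.length : Int)).foldl
      (fun arr i =>
        (PySem.List.pyRange (pvInt (PySem.List.pyGetD v0 i ""))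
            (pvInt (PySem.List.pyGetD v1 i "") + 1)).foldl
          (fun arr2 j => pvMark arr2 i j) arr)
      ip_arr
  else
    let ip_arr : List (List (Option Int)) :=
      [List.replicate 256 none, List.replicate 256 none,
       List.replicate 256 none, List.replicate 256 none]
    let ip := pvSplit ip_range "."
    (ip.foldl (fun st partition => (pvMark st.1 st.2 (pvInt partition), st.2 + 1))
      (ip_arr, (0 : Int))).1

-- ===== PORT B =====
def create_ip_range_alt (ip_range : String) : List (List (Option Int)) :=
  let se : List String × List String :=
    if PySem.Str.isIn "-" ip_range then
      let parts := pvSplit ip_range "-"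
      (pvSplit (parts.getD 0 "") ".", pvSplit (parts.getD 1 "") ".")
    else
      let s := pvSplit ip_range "."
      (s, s)
  let bounds := (PySem.List.pyRange 0 (se.1.length : Int)).map
      (fun i => (pvInt (PySem.List.pyGetD se.1 i ""), pvInt (PySem.List.pyGetD se.2 i "")))
  (PySem.List.pyRange 0 4).map (fun i =>
    (PySem.List.pyRange 0 256).map (fun j =>
      if i < (bounds.length : Int) ∧ (PySem.List.pyGetD bounds i (0, 0)).1 ≤ j ∧
          j ≤ (PySem.List.pyGetD bounds i (0, 0)).2
      then some 1 else none))

-- ===== PRECONDITION & SPEC =====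
-- the i-th octet string of l, parsed: int(l[i]) (some ↔ no ValueError)
def pvOct (l : List String) (i : Nat) : Option Int := PySem.Int.ofStr? (l.getD i "")

-- Pre_ is exactly the inputs where A returns normally: every octet that int() is
-- applied to parses, the end list is at least as long as the start list, and every
-- index/value actually written is in range (i < 4, 0 ≤ value ≤ 255); otherwise A
-- raises ValueError or IndexError.
def Pre_create_ip_range (ip_range : String) : Prop :=
  if PySem.Str.isIn "-" ip_range then
    let parts := pvSplit ip_range "-"
    let s := pvSplit (parts.getD 0 "") "."
    let e := pvSplit (parts.getD 1 "") "."
    s.length ≤ e.length ∧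
    ∀ i < s.length, (pvOct s i).isSome = true ∧ (pvOct e i).isSome = true ∧
      ((pvOct s i).getD 0 ≤ (pvOct e i).getD 0 →
        i < 4 ∧ 0 ≤ (pvOct s i).getD 0 ∧ (pvOct e i).getD 0 ≤ 255)
  else
    let ip := pvSplit ip_range "."
    ip.length ≤ 4 ∧ ∀ i < ip.length, (pvOct ip i).isSome = true ∧
      0 ≤ (pvOct ip i).getD 0 ∧ (pvOct ip i).getD 0 ≤ 255

instance (ip_range : String) : Decidable (Pre_create_ip_range ip_range) := by
  unfold Pre_create_ip_range; infer_instance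

def pvWitness_create_ip_range : String := "1.2.3.4"

def Spec_create_ip_range (ip_range : String) (out : List (List (Option Int))) : Prop := out = create_ip_range_alt ip_range
instance (ip_range : String) (out : List (List (Option Int))) : Decidable (Spec_create_ip_range ip_range out) := by unfold Spec_create_ip_range; infer_instance

-- ===== CLAIM (what is proved, stated in full; the proofs are below) =====
def Claim_equal_create_ip_range : Prop := ∀ (ip_range : String), Dom_create_ip_range ip_range → Pre_create_ip_range ip_range → Spec_create_ip_range ip_range (create_ip_range ip_range)

-- ===== LEMMAS AND PROOFS =====

-- the 4×256 table whose cell (i, j) holds 1 exactly when P i j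
def pvTbl (P : Nat → Nat → Bool) : List (List (Option Int)) :=
  (List.range 4).map (fun i => (List.range 256).map (fun j => if P i j then some 1 else none))

lemma pvTbl_congr {P Q : Nat → Nat → Bool}
    (h : ∀ i < 4, ∀ j < 256, P i j = Q i j) : pvTbl P = pvTbl Q := by
  unfold pvTbl
  refine List.map_congr_left (fun i hi => ?_)
  refine List.map_congr_left (fun j hj => ?_)
  rw [h i (List.mem_range.mp hi) j (List.mem_range.mp hj)]

lemma pvSet_map_range {α : Type} (f : Nat → α) (n k : Nat) (v : α) :
    ((List.range n).map f).set k v = (List.range n).map (fun m => if m = k then v else f m) := by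
  apply List.ext_getElem
  · simp
  · intro m hm hm'
    rw [List.getElem_set]
    simp only [List.getElem_map, List.getElem_range]
    split_ifs with h1 h2 h2 <;> first | rfl | omega

set_option maxRecDepth 4096 in
lemma pvTbl_init :
    ([List.replicate 256 none, List.replicate 256 none,
      List.replicate 256 none, List.replicate 256 none] : List (List (Option Int)))
      = pvTbl (fun _ _ => false) := by
  decide

lemma pvMark_tbl (P : Nat → Nat → Bool) (i j : Nat) (hi : i < 4) (hj : j < 256) :
    pvMark (pvTbl P) (i : Int) (j : Int)
      = pvTbl (fun i' j' => P i' j' || (i' == i && j' == j)) := by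
  unfold pvMark pvTbl
  rw [Int.toNat_natCast, Int.toNat_natCast]
  rw [List.getD_eq_getElem _ _ (by simp [hi]), List.getElem_map, List.getElem_range,
      pvSet_map_range, pvSet_map_range]
  refine List.map_congr_left (fun i' hi' => ?_)
  by_cases h1 : i' = i
  · subst h1
    simp only [if_pos rfl]
    refine List.map_congr_left (fun j' hj' => ?_)
    by_cases h2 : j' = j <;> simp [h2]
  · simp only [if_neg h1]
    refine List.map_congr_left (fun j' hj' => ?_)
    simp [h1]

lemma pvInner (i : Nat) (hi : i < 4) :
    ∀ (n : Nat) (a b : Int) (P : Nat → Nat → Bool), (b + 1 - a).toNat = n → 0 ≤ a → b ≤ 255 →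
    (PySem.List.pyRange a (b + 1)).foldl (fun arr j => pvMark arr (i : Int) j) (pvTbl P)
      = pvTbl (fun i' j' => P i' j' || (i' == i && decide (a ≤ (j' : Int)) && decide ((j' : Int) ≤ b))) := by
  intro n
  induction n with
  | zero =>
    intro a b P hn ha hb
    rw [PySem.List.pyRange_one_eq_nil (by omega)]
    simp only [List.foldl_nil]
    refine pvTbl_congr (fun i' _ j' _ => ?_)
    cases hP : P i' j' <;> simp [hP] <;> omega
  | succ n ih =>
    intro a b P hn ha hb
    rw [PySem.List.pyRange_one_cons (by omega)]
    simp only [List.foldl_cons]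
    have ha' : a = ((a.toNat : Nat) : Int) := by omega
    have hlt : a.toNat < 256 := by omega
    rw [ha', pvMark_tbl P i a.toNat hi hlt]
    rw [ih ((a.toNat : Int) + 1) b _ (by omega) (by omega) hb]
    refine pvTbl_congr (fun i' _ j' hj' => ?_)
    rw [Bool.eq_iff_iff]
    cases hP : P i' j' <;> by_cases h1 : i' = i <;> simp [hP, h1] <;> omega

lemma pvOuter (s e : List String)
    (hPre : ∀ i < s.length, (pvOct s i).isSome = true ∧ (pvOct e i).isSome = true ∧
      ((pvOct s i).getD 0 ≤ (pvOct e i).getD 0 →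
        i < 4 ∧ 0 ≤ (pvOct s i).getD 0 ∧ (pvOct e i).getD 0 ≤ 255)) :
    ∀ k ≤ s.length,
    (PySem.List.pyRange 0 (k : Int)).foldl
      (fun arr i =>
        (PySem.List.pyRange (pvInt (PySem.List.pyGetD s i ""))
            (pvInt (PySem.List.pyGetD e i "") + 1)).foldl
          (fun arr2 j => pvMark arr2 i j) arr)
      (pvTbl (fun _ _ => false))
      = pvTbl (fun i j => decide (i < k) && decide (pvInt (s.getD i "") ≤ (j : Int))
          && decide ((j : Int) ≤ pvInt (e.getD i ""))) := by
  intro k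
  induction k with
  | zero =>
    intro _
    rw [PySem.List.pyRange_one_eq_nil (by omega)]
    simp only [List.foldl_nil]
    exact pvTbl_congr (fun i _ j _ => by simp)
  | succ k ih =>
    intro hk
    have h1 : ((k + 1 : Nat) : Int) = (k : Int) + 1 := by push_cast; ring
    rw [h1, PySem.List.pyRange_one_succ_right (by omega), List.foldl_append,
      ih (by omega)]
    simp only [List.foldl_cons, List.foldl_nil, PySem.List.pyGetD_natCast]
    have hsk : pvInt (s.getD k "") = (pvOct s k).getD 0 := by simp [pvInt, pvOct]
    have hek : pvInt (e.getD k "") = (pvOct e k).getD 0 := by simp [pvInt, pvOct]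
    obtain ⟨_, _, hrng⟩ := hPre k (by omega)
    rw [← hsk, ← hek] at hrng
    by_cases hab : pvInt (s.getD k "") ≤ pvInt (e.getD k "")
    · obtain ⟨hk4, ha0, hb255⟩ := hrng hab
      rw [pvInner k hk4 _ _ _ _ rfl ha0 hb255]
      refine pvTbl_congr (fun i _ j _ => ?_)
      rw [Bool.eq_iff_iff]
      by_cases h2 : i = k <;> simp [h2] <;> omega
    · rw [PySem.List.pyRange_one_eq_nil (by omega)]
      simp only [List.foldl_nil]
      refine pvTbl_congr (fun i _ j _ => ?_)
      rw [Bool.eq_iff_iff]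
      simp only [pvInt, pvOct] at hab ⊢
      by_cases h2 : i = k <;> simp [h2] at hab ⊢ <;> omega

lemma pvSingle :
    ∀ (l : List String) (p : Nat) (P : Nat → Nat → Bool), p + l.length ≤ 4 →
    (∀ i < l.length, (pvOct l i).isSome = true ∧
      0 ≤ (pvOct l i).getD 0 ∧ (pvOct l i).getD 0 ≤ 255) →
    (l.foldl (fun st partition => (pvMark st.1 st.2 (pvInt partition), st.2 + 1))
        (pvTbl P, (p : Int)))
      = (pvTbl (fun i j => P i j || (decide (p ≤ i) && decide (i < p + l.length)
            && decide (pvInt (l.getD (i - p) "") = (j : Int)))), ((p + l.length : Nat) : Int)) := by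
  intro l
  induction l with
  | nil =>
    intro p P _ _
    simp only [List.foldl_nil, List.length_nil, Nat.add_zero]
    refine Prod.ext ?_ rfl
    dsimp only
    refine pvTbl_congr (fun i _ j _ => ?_)
    rw [Bool.eq_iff_iff]
    simp
  | cons x t ih =>
    intro p P hlen hvals
    simp only [List.length_cons] at hlen
    simp only [List.foldl_cons, List.length_cons]
    obtain ⟨hs0, hv0, hv255⟩ := hvals 0 (by simp)
    simp only [pvOct, List.getD_cons_zero] at hs0 hv0 hv255
    have hx : pvInt x = (PySem.Int.ofStr? x).getD 0 := rfl
    have hxn : pvInt x = ((pvInt x).toNat : Int) := by omega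
    have hxlt : (pvInt x).toNat < 256 := by omega
    have hp4 : p < 4 := by omega
    have hstep : pvMark (pvTbl P) (p : Int) (pvInt x)
        = pvTbl (fun i' j' => P i' j' || (i' == p && j' == (pvInt x).toNat)) := by
      rw [hxn]; exact pvMark_tbl P p (pvInt x).toNat hp4 hxlt
    rw [hstep]
    have h1 : ((p : Int) + 1) = ((p + 1 : Nat) : Int) := by push_cast; ring
    rw [h1, ih (p + 1) _ (by omega)
      (fun i hi => hvals (i + 1) (by simp only [List.length_cons]; omega))]
    refine Prod.ext ?_ (by dsimp only; push_cast; ring)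
    dsimp only
    refine pvTbl_congr (fun i _ j _ => ?_)
    rw [Bool.eq_iff_iff]
    by_cases h2 : i = p
    · subst h2
      have : i - i = 0 := by omega
      simp [pvInt]
      constructor
      · rintro (h | h)
        · exact Or.inl h
        · exact Or.inr (by omega)
      · rintro (h | h)
        · exact Or.inl h
        · exact Or.inr (by omega)
    · by_cases h3 : p + 1 ≤ i ∧ i < p + 1 + t.length
      · have h4 : (x :: t).getD (i - p) "" = t.getD (i - (p + 1)) "" := by
          have : i - p = (i - (p + 1)) + 1 := by omega
          rw [this]; rfl
        simp [h2]
        have h5 : (x :: t)[i - p]?.getD "" = t[i - (p + 1)]?.getD "" := by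
          rw [show i - p = (i - (p + 1)) + 1 by omega, List.getElem?_cons_succ]
        rw [h5]
        constructor
        · rintro (h | ⟨hc, hv⟩)
          · exact Or.inl h
          · exact Or.inr ⟨by omega, hv⟩
        · rintro (h | ⟨hc, hv⟩)
          · exact Or.inl h
          · exact Or.inr ⟨by omega, hv⟩
      · simp [h2]
        constructor
        · rintro (h | ⟨hc, hv⟩)
          · exact Or.inl h
          · exact absurd hc (by omega)
        · rintro (h | ⟨hc, hv⟩)
          · exact Or.inl h
          · exact absurd hc (by omega)

lemma pvAlt_tbl (bnds : List (Int × Int)) :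
    ((PySem.List.pyRange 0 4).map (fun i =>
      (PySem.List.pyRange 0 256).map (fun j =>
        if i < (bnds.length : Int) ∧ (PySem.List.pyGetD bnds i (0, 0)).1 ≤ j ∧
            j ≤ (PySem.List.pyGetD bnds i (0, 0)).2
        then some 1 else none)))
      = pvTbl (fun i j => decide (i < bnds.length)
          && decide ((bnds.getD i (0, 0)).1 ≤ (j : Int))
          && decide ((j : Int) ≤ (bnds.getD i (0, 0)).2)) := by
  rw [PySem.List.pyRange_zero 4, PySem.List.pyRange_zero 256, List.map_map]
  unfold pvTbl
  refine List.map_congr_left (fun i hi => ?_)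
  simp only [Function.comp]
  rw [List.map_map]
  refine List.map_congr_left (fun j hj => ?_)
  simp only [Function.comp, PySem.List.pyGetD_natCast]
  simp only [Bool.and_eq_true, decide_eq_true_iff]
  split_ifs with h1 h2 h2
  · rfl
  · exact absurd ⟨⟨by exact_mod_cast h1.1, h1.2.1⟩, h1.2.2⟩ h2
  · exact absurd ⟨by exact_mod_cast h2.1.1, h2.1.2, h2.2⟩ h1
  · rfl


-- ===== VERDICT (by name: the statement is the Claim_ definition above) =====
theorem create_ip_range_spec : Claim_equal_create_ip_range := by
  intro ip_range _ hPre
  unfold Spec_create_ip_range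
  unfold Pre_create_ip_range at hPre
  by_cases hin : PySem.Str.isIn "-" ip_range = true
  · rw [if_pos hin] at hPre
    obtain ⟨hlen, hvals⟩ := hPre
    simp only [create_ip_range, create_ip_range_alt, hin, if_true]
    set s := pvSplit ((pvSplit ip_range "-").getD 0 "") "." with hs
    set e := pvSplit ((pvSplit ip_range "-").getD 1 "") "." with he
    set bnds := (PySem.List.pyRange 0 (s.length : Int)).map
      (fun i => (pvInt (PySem.List.pyGetD s i ""), pvInt (PySem.List.pyGetD e i ""))) with hb
    rw [pvTbl_init, pvOuter s e hvals s.length le_rfl, pvAlt_tbl bnds]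
    have hblen : bnds.length = s.length := by
      simp [hb, PySem.List.pyRange_zero]
    have hget : ∀ i : Nat, i < s.length → bnds.getD i (0, 0)
        = (pvInt (s.getD i ""), pvInt (e.getD i "")) := by
      intro i hi
      rw [hb, PySem.List.pyRange_zero, List.map_map]
      rw [PySem.List.getD_map_range _ _ _ _ (by simpa using hi)]
      simp
    refine pvTbl_congr (fun i _ j _ => ?_)
    by_cases hi : i < s.length
    · rw [hget i hi, hblen]
    · rw [hblen]
      simp [hi]
  · rw [if_neg hin] at hPre
    obtain ⟨hlen, hvals⟩ := hPre
    simp only [create_ip_range, create_ip_range_alt, hin, Bool.false_eq_true, if_false]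
    set ipl := pvSplit ip_range "." with hip
    set bnds := (PySem.List.pyRange 0 (ipl.length : Int)).map
      (fun i => (pvInt (PySem.List.pyGetD ipl i ""), pvInt (PySem.List.pyGetD ipl i ""))) with hb
    have h0 : (0 : Int) = ((0 : Nat) : Int) := rfl
    rw [pvTbl_init]
    conv_lhs => rw [h0]
    rw [pvSingle ipl 0 (fun _ _ => false) (by omega) hvals, pvAlt_tbl bnds]
    dsimp only
    have hblen : bnds.length = ipl.length := by
      simp [hb, PySem.List.pyRange_zero]
    have hget : ∀ i : Nat, i < ipl.length → bnds.getD i (0, 0)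
        = (pvInt (ipl.getD i ""), pvInt (ipl.getD i "")) := by
      intro i hi
      rw [hb, PySem.List.pyRange_zero, List.map_map]
      rw [PySem.List.getD_map_range _ _ _ _ (by simpa using hi)]
      simp
    refine pvTbl_congr (fun i _ j _ => ?_)
    by_cases hi : i < ipl.length
    · rw [hget i hi, hblen]
      rw [Bool.eq_iff_iff]
      simp
      omega
    · rw [hblen]
      simp [hi]
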